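-- pv_equiv track=rewrite | github.com/lennox-davidlevy/python_works | user_input_and_while_loops/restaurant_seating.py | closest_accommodated_table
-- ===== SOURCE A (Python) =====
-- def closest_accommodated_table(n, tables):
--     if not n or len(tables) == 0:
--         return "NOBODY"
--     closest = None
--     for i in tables:
--         if (i >= n) and (closest is None or i < closest):
--             closest = i
--     return closest
-- ===== SOURCE B (Python) =====
-- def closest_accommodated_table(n, tables):
--     if not n or len(tables) == 0:
--         return "NOBODY"
--     for x in sorted(tables):
--         if x >= n:
--             return x
--     return None
-- ===== Notes on version B (the rewrite author's own statement) =====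
-- stated objective: alternative
-- what changed: B sorts the table list and returns the first element >= n found in the sorted order, instead of A's single linear scan that maintains a running minimum accumulator.
-- outside the precondition, e.g. on closest_accommodated_table(0, [4, 5]): A returns 'NOBODY', B returns 'NOBODY'; on closest_accommodated_table(3, []): A returns 'NOBODY', B returns 'NOBODY'
import Mathlib
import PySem

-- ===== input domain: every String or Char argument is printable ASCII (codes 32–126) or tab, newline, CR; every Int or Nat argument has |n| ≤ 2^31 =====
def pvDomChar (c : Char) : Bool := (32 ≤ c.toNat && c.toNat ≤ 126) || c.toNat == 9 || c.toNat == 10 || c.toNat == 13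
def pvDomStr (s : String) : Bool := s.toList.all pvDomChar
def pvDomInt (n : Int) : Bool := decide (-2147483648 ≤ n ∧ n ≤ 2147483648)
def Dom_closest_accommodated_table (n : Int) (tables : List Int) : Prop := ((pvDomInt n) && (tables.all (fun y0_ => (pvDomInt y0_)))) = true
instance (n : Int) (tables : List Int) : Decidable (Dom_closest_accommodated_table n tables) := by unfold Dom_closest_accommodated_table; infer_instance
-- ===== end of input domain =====

-- B replaces A's running-minimum linear scan by sorting the list and taking the first
-- element ≥ n in sorted order (alternative decomposition; not claimed faster).

-- ===== PORT A =====
-- Python A returns the STRING "NOBODY" when n == 0 (falsy) or tables is empty; that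
-- branch leaves the Option Int return type and is excluded by Pre_ (none stands in here).
def closest_accommodated_table (n : Int) (tables : List Int) : Option Int :=
  if n = 0 ∨ tables = [] then none
  else
    tables.foldl
      (fun closest i =>
        match closest with
        | none => if n ≤ i then some i else none
        | some c => if n ≤ i ∧ i < c then some i else some c)
      none

-- ===== PORT B =====
def closest_accommodated_table_alt (n : Int) (tables : List Int) : Option Int :=
  if n = 0 ∨ tables = [] then none
  else (PySem.List.sorted tables (fun x => x) false).find? (fun x => n ≤ x)

-- ===== PRECONDITION & SPEC =====
-- Pre_ excludes n == 0 and tables == [], on which Python A returns the string "NOBODY",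
-- a value outside the declared Option Int return type (B returns the same string there).
def Pre_closest_accommodated_table (n : Int) (tables : List Int) : Prop :=
  n ≠ 0 ∧ tables ≠ []
instance (n : Int) (tables : List Int) : Decidable (Pre_closest_accommodated_table n tables) := by unfold Pre_closest_accommodated_table; infer_instance

def pvWitness_closest_accommodated_table : Int × List Int := (3, [2, 5, 4])

def Spec_closest_accommodated_table (n : Int) (tables : List Int) (out : Option Int) : Prop := out = closest_accommodated_table_alt n tables
instance (n : Int) (tables : List Int) (out : Option Int) : Decidable (Spec_closest_accommodated_table n tables out) := by unfold Spec_closest_accommodated_table; infer_instance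

-- ===== CLAIM (what is proved, stated in full; the proofs are below) =====
def Claim_equal_closest_accommodated_table : Prop := ∀ (n : Int) (tables : List Int), Dom_closest_accommodated_table n tables → Pre_closest_accommodated_table n tables → Spec_closest_accommodated_table n tables (closest_accommodated_table n tables)

-- ===== LEMMAS AND PROOFS =====

-- A's loop step.
def pvStepA (n : Int) (closest : Option Int) (i : Int) : Option Int :=
  match closest with
  | none => if n ≤ i then some i else none
  | some c => if n ≤ i ∧ i < c then some i else some c

-- minimum value among the elements ≥ n (structural spec both ports meet)
def pvCMin (n : Int) : List Int → Option Int
  | [] => none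
  | i :: t =>
      let r := pvCMin n t
      if n ≤ i then
        match r with
        | none => some i
        | some c => some (min i c)
      else r

def pvOMerge : Option Int → Option Int → Option Int
  | none, b => b
  | a, none => a
  | some x, some y => some (min x y)

theorem pvFoldA_eq (n : Int) (l : List Int) :
    ∀ acc : Option Int, l.foldl (pvStepA n) acc = pvOMerge acc (pvCMin n l) := by
  induction l with
  | nil => intro acc; cases acc <;> rfl
  | cons i t ih =>
      intro acc
      have : (i :: t).foldl (pvStepA n) acc = t.foldl (pvStepA n) (pvStepA n acc i) := rfl
      rw [this, ih]
      cases acc with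
      | none =>
          simp only [pvStepA, pvCMin, pvOMerge]
          by_cases h : n ≤ i
          · simp only [h, if_pos]
            cases pvCMin n t <;> simp
          · simp [h]
      | some a =>
          simp only [pvStepA, pvCMin]
          by_cases h : n ≤ i
          · cases hr : pvCMin n t with
            | none =>
                by_cases h2 : i < a <;> simp [h, h2, pvOMerge, min_def]
            | some c =>
                by_cases h2 : i < a <;> simp [h, h2, pvOMerge, min_def] <;> omega
          · simp [h]

theorem pvCMin_mem (n : Int) (l : List Int) :
    ∀ c, pvCMin n l = some c → c ∈ l ∧ n ≤ c := by
  induction l with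
  | nil => intro c h; simp [pvCMin] at h
  | cons i t ih =>
      intro c h
      simp only [pvCMin] at h
      by_cases hi : n ≤ i
      · simp only [hi, if_pos] at h
        cases hr : pvCMin n t with
        | none => rw [hr] at h; simp at h; subst h; exact ⟨List.mem_cons_self, hi⟩
        | some d =>
            rw [hr] at h
            simp at h
            obtain ⟨hd, hnd⟩ := ih d hr
            rcases min_cases i d with ⟨he, _⟩ | ⟨he, _⟩
            · rw [he] at h; subst h; exact ⟨List.mem_cons_self, hi⟩
            · rw [he] at h; subst h; exact ⟨List.mem_cons_of_mem _ hd, hnd⟩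
      · simp only [hi, if_neg, not_false_iff] at h
        obtain ⟨hd, hnd⟩ := ih c h
        exact ⟨List.mem_cons_of_mem _ hd, hnd⟩

theorem pvCMin_none (n : Int) (l : List Int) (h : pvCMin n l = none) :
    ∀ x ∈ l, ¬ n ≤ x := by
  induction l with
  | nil => simp
  | cons i t ih =>
      intro x hx
      simp only [pvCMin] at h
      by_cases hi : n ≤ i
      · simp only [hi, if_pos] at h
        cases hs : pvCMin n t <;> rw [hs] at h <;> simp at h
      · simp only [hi, if_neg, not_false_iff] at h
        rcases List.mem_cons.mp hx with rfl | hxt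
        · exact hi
        · exact ih h x hxt

theorem pvCMin_le (n : Int) (l : List Int) :
    ∀ c, pvCMin n l = some c → ∀ x ∈ l, n ≤ x → c ≤ x := by
  induction l with
  | nil => simp
  | cons i t ih =>
      intro c h x hx hnx
      simp only [pvCMin] at h
      by_cases hi : n ≤ i
      · simp only [hi, if_pos] at h
        cases hr : pvCMin n t with
        | none =>
            rw [hr] at h; simp at h; subst h
            rcases List.mem_cons.mp hx with rfl | hxt
            · exact le_refl _
            · exact absurd hnx (pvCMin_none n t hr x hxt)
        | some d =>
            rw [hr] at h; simp at h; subst h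
            rcases List.mem_cons.mp hx with rfl | hxt
            · exact min_le_left _ _
            · exact le_trans (min_le_right _ _) (ih d hr x hxt hnx)
      · simp only [hi, if_neg, not_false_iff] at h
        rcases List.mem_cons.mp hx with rfl | hxt
        · exact absurd hnx hi
        · exact ih c h x hxt hnx

-- pvCMin depends only on which elements occur
theorem pvCMin_ext (n : Int) (l₁ l₂ : List Int) (hm : ∀ x, x ∈ l₁ ↔ x ∈ l₂) :
    pvCMin n l₁ = pvCMin n l₂ := by
  cases h1 : pvCMin n l₁ with
  | none =>
      cases h2 : pvCMin n l₂ with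
      | none => rfl
      | some c =>
          obtain ⟨hc, hnc⟩ := pvCMin_mem n l₂ c h2
          exact absurd hnc (pvCMin_none n l₁ h1 c ((hm c).mpr hc))
  | some c =>
      obtain ⟨hc, hnc⟩ := pvCMin_mem n l₁ c h1
      cases h2 : pvCMin n l₂ with
      | none => exact absurd hnc (pvCMin_none n l₂ h2 c ((hm c).mp hc))
      | some d =>
          obtain ⟨hd, hnd⟩ := pvCMin_mem n l₂ d h2
          have h12 : c ≤ d := pvCMin_le n l₁ c h1 d ((hm d).mpr hd) hnd
          have h21 : d ≤ c := pvCMin_le n l₂ d h2 c ((hm c).mp hc) hnc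
          simp [le_antisymm h12 h21]

-- find? on an ascending list is pvCMin
theorem pvFind_sorted (n : Int) (s : List Int) (hs : s.Pairwise (· ≤ ·)) :
    s.find? (fun x => n ≤ x) = pvCMin n s := by
  induction s with
  | nil => rfl
  | cons a t ih =>
      obtain ⟨ha, ht⟩ := List.pairwise_cons.mp hs
      by_cases h : n ≤ a
      · rw [List.find?_cons_of_pos (h := by simpa using h)]
        simp only [pvCMin, h, if_pos]
        cases hr : pvCMin n t with
        | none => rfl
        | some c =>
            obtain ⟨hc, _⟩ := pvCMin_mem n t c hr
            have : min a c = a := min_eq_left (ha c hc)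
            simp [this]
      · rw [List.find?_cons_of_neg (h := by simpa using h)]
        simp only [pvCMin, h, if_neg, not_false_iff]
        exact ih ht

-- ===== VERDICT (by name: the statement is the Claim_ definition above) =====
theorem closest_accommodated_table_spec : Claim_equal_closest_accommodated_table := by
  intro n tables _ _
  unfold Spec_closest_accommodated_table closest_accommodated_table closest_accommodated_table_alt
  by_cases hg : n = 0 ∨ tables = []
  · simp [hg]
  · rw [if_neg hg, if_neg hg]
    have hA : tables.foldl (pvStepA n) none = pvCMin n tables := pvFoldA_eq n tables none
    have hB : (PySem.List.sorted tables (fun x => x) false).find? (fun x => n ≤ x)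
        = pvCMin n (PySem.List.sorted tables (fun x => x) false) := by
      apply pvFind_sorted
      have := PySem.List.sorted_pairwise (xs := tables) (key := fun x => x)
      simpa using this
    show tables.foldl (pvStepA n) none = _
    rw [hA, hB]
    exact pvCMin_ext n tables _ (fun x => (PySem.List.mem_sorted tables (fun x => x) false x).symm)
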